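-- pv_equiv track=rewrite | github.com/kthowns/challenge30-codingtest-study | 최수환-suwhan2/0517/circleRoom.py | findMinDistance
-- ===== SOURCE A (Python) =====
-- def findMinDistance(N,limitpeople,mindistance):
--     for i in range(N):
--         sumnumber=0
--
--         for j in range(N):            #거리 구하기
--
--             if i<j:
--                 sumnumber += (j-i)*limitpeople[j]
--             elif i>j:
--                 sumnumber += (N-i+j)*limitpeople[j]
--             else:
--                 continue
--
--         mindistance=min(mindistance,sumnumber) #최소거리 비교
--
--     return mindistance
-- ===== SOURCE B (Python) =====
-- def findMinDistance(N, limitpeople, mindistance):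
--     # O(N): compute the i=0 sum once, then slide with s(i+1) = s(i) - total + N*w[i]
--     total = 0
--     base = 0
--     for j in range(N):
--         total += limitpeople[j]
--         base += j * limitpeople[j]
--     s = base
--     for i in range(N):
--         mindistance = min(mindistance, s)
--         s = s - total + N * limitpeople[i]
--     return mindistance
-- ===== Notes on version B (the rewrite author's own statement) =====
-- stated objective: faster
-- what changed: Replaces the O(N^2) double loop by a single O(N) pass: the i=0 weighted-distance sum is computed once and each subsequent rotation's sum is obtained by the recurrence s(i+1)=s(i)-total+N*w[i].
-- outside the precondition, e.g. on findMinDistance(1, [], 6): A returns 0, B raises IndexError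
import Mathlib
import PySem

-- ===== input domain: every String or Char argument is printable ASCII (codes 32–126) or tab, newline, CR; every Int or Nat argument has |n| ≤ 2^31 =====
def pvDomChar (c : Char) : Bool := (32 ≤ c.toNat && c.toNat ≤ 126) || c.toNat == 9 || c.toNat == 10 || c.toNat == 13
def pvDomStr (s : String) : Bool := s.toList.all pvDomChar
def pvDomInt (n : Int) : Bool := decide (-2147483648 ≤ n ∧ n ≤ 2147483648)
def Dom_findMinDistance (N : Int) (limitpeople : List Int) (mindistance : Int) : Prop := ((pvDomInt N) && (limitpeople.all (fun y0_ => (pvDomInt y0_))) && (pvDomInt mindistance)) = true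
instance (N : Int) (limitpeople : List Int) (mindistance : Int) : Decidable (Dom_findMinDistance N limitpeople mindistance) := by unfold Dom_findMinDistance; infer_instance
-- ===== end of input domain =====

-- B replaces A's O(N^2) double loop by one O(N) pass using the sliding recurrence s(i+1) = s(i) - total + N*w[i].

-- ===== PORT A =====
def findMinDistance (N : Int) (limitpeople : List Int) (mindistance : Int) : Int :=
  (PySem.List.pyRange 0 N 1).foldl (fun md i =>
    let sumnumber : Int :=
      (PySem.List.pyRange 0 N 1).foldl (fun sumnumber j =>
        if i < j then sumnumber + (j - i) * PySem.List.pyGetD limitpeople j 0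
        else if j < i then sumnumber + (N - i + j) * PySem.List.pyGetD limitpeople j 0
        else sumnumber) 0
    min md sumnumber) mindistance

-- ===== PORT B =====
def findMinDistance_alt (N : Int) (limitpeople : List Int) (mindistance : Int) : Int :=
  let tb := (PySem.List.pyRange 0 N 1).foldl (fun p j =>
      (p.1 + PySem.List.pyGetD limitpeople j 0, p.2 + j * PySem.List.pyGetD limitpeople j 0)) (0, 0)
  let ms := (PySem.List.pyRange 0 N 1).foldl (fun p i =>
      (min p.1 p.2, p.2 - tb.1 + N * PySem.List.pyGetD limitpeople i 0)) (mindistance, tb.2)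
  ms.1

-- ===== PRECONDITION & SPEC =====
-- Pre_ excludes inputs with N exceeding the list length, where indexing limitpeople raises IndexError: A raises there for N >= 2,
-- and at N = 1 (where A's i == j branch skips the only index) B's base-sum pass still indexes and raises, so both stay excluded.
def Pre_findMinDistance (N : Int) (limitpeople : List Int) (mindistance : Int) : Prop :=
  N ≤ (limitpeople.length : Int)
instance (N : Int) (limitpeople : List Int) (mindistance : Int) : Decidable (Pre_findMinDistance N limitpeople mindistance) := by unfold Pre_findMinDistance; infer_instance

def pvWitness_findMinDistance : Int × List Int × Int := (3, ([1, 2, 3], 100))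

def Spec_findMinDistance (N : Int) (limitpeople : List Int) (mindistance : Int) (out : Int) : Prop := out = findMinDistance_alt N limitpeople mindistance
instance (N : Int) (limitpeople : List Int) (mindistance : Int) (out : Int) : Decidable (Spec_findMinDistance N limitpeople mindistance out) := by unfold Spec_findMinDistance; infer_instance

-- ===== CLAIM (what is proved, stated in full; the proofs are below) =====
def Claim_equal_findMinDistance : Prop := ∀ (N : Int) (limitpeople : List Int) (mindistance : Int), Dom_findMinDistance N limitpeople mindistance → Pre_findMinDistance N limitpeople mindistance → Spec_findMinDistance N limitpeople mindistance (findMinDistance N limitpeople mindistance)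

-- ===== LEMMAS AND PROOFS =====

-- w j = limitpeople[j] (total form), f i j = A's per-j contribution, S i = A's inner-loop sum,
-- T = total weight, B0 = the i = 0 sum.
def pvW (L : List Int) : Int → Int := fun j => PySem.List.pyGetD L j 0
def pvF (N : Int) (L : List Int) (i j : Int) : Int :=
  if i < j then (j - i) * pvW L j else if j < i then (N - i + j) * pvW L j else 0
def pvS (N : Int) (L : List Int) (i : Int) : Int := ((PySem.List.pyRange 0 N 1).map (pvF N L i)).sum
def pvT (N : Int) (L : List Int) : Int := ((PySem.List.pyRange 0 N 1).map (pvW L)).sum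
def pvB0 (N : Int) (L : List Int) : Int := ((PySem.List.pyRange 0 N 1).map (fun j => j * pvW L j)).sum

-- A's inner loop computes S i.
lemma inner_eq_pvS (N : Int) (L : List Int) (i : Int) :
    (PySem.List.pyRange 0 N 1).foldl (fun sumnumber j =>
        if i < j then sumnumber + (j - i) * PySem.List.pyGetD L j 0
        else if j < i then sumnumber + (N - i + j) * PySem.List.pyGetD L j 0
        else sumnumber) 0 = pvS N L i := by
  have h : ∀ (acc j : Int),
      (if i < j then acc + (j - i) * PySem.List.pyGetD L j 0
       else if j < i then acc + (N - i + j) * PySem.List.pyGetD L j 0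
       else acc) = acc + pvF N L i j := by
    intro acc j
    unfold pvF pvW
    split_ifs <;> ring
  rw [PySem.List.foldl_congr_mem (PySem.List.pyRange 0 N 1) _
      (fun acc j => acc + pvF N L i j) 0 (fun acc x _ => h acc x),
    PySem.List.foldl_add]
  simp [pvS]

lemma sum_map_congr {l : List Int} {f g : Int → Int} (h : ∀ x ∈ l, f x = g x) :
    (l.map f).sum = (l.map g).sum := by
  rw [List.map_congr_left h]

-- the sliding-window recurrence: S (i+1) = S i - T + N * w i  for 0 ≤ i < N
lemma pvS_step (N : Int) (L : List Int) (i : Int) (h0 : 0 ≤ i) (h1 : i < N) :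
    pvS N L (i + 1) = pvS N L i - pvT N L + N * pvW L i := by
  have hsplit : PySem.List.pyRange 0 N 1
      = PySem.List.pyRange 0 i 1 ++ (i :: PySem.List.pyRange (i + 1) N 1) := by
    rw [PySem.List.pyRange_one_append 0 i N h0 (le_of_lt h1),
        PySem.List.pyRange_one_cons h1]
  have hlo : ∀ j ∈ PySem.List.pyRange 0 i 1, pvF N L (i + 1) j = pvF N L i j - pvW L j := by
    intro j hj
    rw [PySem.List.mem_pyRange_one] at hj
    unfold pvF
    rw [if_neg (by omega), if_pos (by omega), if_neg (by omega), if_pos hj.2]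
    ring
  have hhi : ∀ j ∈ PySem.List.pyRange (i + 1) N 1, pvF N L (i + 1) j = pvF N L i j - pvW L j := by
    intro j hj
    rw [PySem.List.mem_pyRange_one] at hj
    rcases eq_or_lt_of_le hj.1 with heq | hlt
    · subst heq
      unfold pvF
      rw [if_neg (by omega), if_neg (by omega), if_pos (by omega)]
      ring
    · unfold pvF
      rw [if_pos hlt, if_pos (by omega)]
      ring
  have hmid : pvF N L (i + 1) i = pvF N L i i - pvW L i + N * pvW L i := by
    unfold pvF
    rw [if_neg (by omega), if_pos (by omega), if_neg (by omega), if_neg (by omega)]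
    ring
  unfold pvS pvT
  rw [hsplit]
  simp only [List.map_append, List.map_cons, List.sum_append, List.sum_cons]
  rw [sum_map_congr hlo, sum_map_congr hhi, hmid]
  have e1 : ∀ (l : List Int) (f w : Int → Int),
      (l.map (fun j => f j - w j)).sum = (l.map f).sum - (l.map w).sum := by
    intro l f w
    induction l with
    | nil => simp
    | cons x xs ih => simp [ih]; ring
  rw [e1, e1]
  ring

-- the two loops agree given the invariant s = S k
lemma loop_eq (N : Int) (L : List Int) (T : Int) (hT : T = pvT N L) :
    ∀ (n : Nat) (k md s : Int), 0 ≤ k → (N - k).toNat = n → s = pvS N L k →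
    (PySem.List.pyRange k N 1).foldl (fun mindistance i =>
        let sumnumber : Int :=
          (PySem.List.pyRange 0 N 1).foldl (fun sumnumber j =>
            if i < j then sumnumber + (j - i) * PySem.List.pyGetD L j 0
            else if j < i then sumnumber + (N - i + j) * PySem.List.pyGetD L j 0
            else sumnumber) 0
        min mindistance sumnumber) md
    = ((PySem.List.pyRange k N 1).foldl (fun p i =>
        (min p.1 p.2, p.2 - T + N * PySem.List.pyGetD L i 0)) (md, s)).1 := by
  intro n
  induction n with
  | zero =>
    intro k md s hk hn hs
    rw [PySem.List.pyRange_one_eq_nil (a := k) (b := N) (by omega)]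
    simp
  | succ n ih =>
    intro k md s hk hn hs
    have hkN : k < N := by omega
    rw [PySem.List.pyRange_one_cons hkN]
    simp only [List.foldl_cons]
    rw [inner_eq_pvS, ← hs]
    exact ih (k + 1) (min md s) (s - T + N * PySem.List.pyGetD L k 0) (by omega) (by omega)
      (by rw [pvS_step N L k hk hkN, hs, hT]; rfl)

-- B's first loop computes (T, B0)
lemma first_loop (N : Int) (L : List Int) :
    (PySem.List.pyRange 0 N 1).foldl (fun p j =>
        (p.1 + PySem.List.pyGetD L j 0, p.2 + j * PySem.List.pyGetD L j 0)) ((0 : Int), (0 : Int))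
    = (pvT N L, pvB0 N L) := by
  rw [PySem.List.foldl_prod_mk (f := fun acc j => acc + PySem.List.pyGetD L j 0)
      (g := fun acc j => acc + j * PySem.List.pyGetD L j 0)]
  rw [PySem.List.foldl_add, PySem.List.foldl_add]
  simp only [pvT, pvB0, pvW, zero_add]
  rfl

lemma pvS_zero (N : Int) (L : List Int) : pvS N L 0 = pvB0 N L := by
  unfold pvS pvB0
  apply sum_map_congr
  intro j hj
  rw [PySem.List.mem_pyRange_one] at hj
  unfold pvF pvW
  rcases eq_or_lt_of_le hj.1 with heq | hlt
  · rw [if_neg (by omega), if_neg (by omega), ← heq]; ring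
  · rw [if_pos hlt]; ring

-- ===== VERDICT (by name: the statement is the Claim_ definition above) =====
theorem findMinDistance_spec : Claim_equal_findMinDistance := by
  intro N L m _ _
  unfold Spec_findMinDistance findMinDistance findMinDistance_alt
  rw [first_loop]
  exact loop_eq N L (pvT N L) rfl (N - 0).toNat 0 m (pvB0 N L) le_rfl rfl (pvS_zero N L).symm
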